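-- pv_equiv track=rewrite | github.com/dcurto95/Drug-drug-Interaction-extraction | src/main_ddi_task4.py | basic_features
-- ===== SOURCE A (Python) =====
-- def basic_features(in_between_text, feature_priority):
--     advise_list = ['can', 'could', 'may', 'might', 'will', 'shall', 'should', 'ought', 'must', 'would']
--     effect_list = ['administer', 'potentiate', 'prevent', 'effect', 'cause']
--     mechanism_list = ['reduce', 'increase', 'decrease']
--     int_list = ['interact', 'interaction', 'interfere']
--
--     times = {'int': 0, 'advise': 0, 'effect': 0, 'mechanism': 0}
--     for word in in_between_text.split():
--         if word in int_list:
--             times['int'] = times.get('int', 0) + 1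
--         if word in advise_list:
--             times['advise'] = times.get('advise', 0) + 1
--         if word in effect_list:
--             times['effect'] = times.get('effect', 0) + 1
--         if word in mechanism_list:
--             times['mechanism'] = times.get('mechanism', 0) + 1
--
--     return [(feature_priority, value) for key, value in times.items()]
-- ===== SOURCE B (Python) =====
-- def basic_features(in_between_text, feature_priority):
--     advise_list = ['can', 'could', 'may', 'might', 'will', 'shall', 'should', 'ought', 'must', 'would']
--     effect_list = ['administer', 'potentiate', 'prevent', 'effect', 'cause']
--     mechanism_list = ['reduce', 'increase', 'decrease']
--     int_list = ['interact', 'interaction', 'interfere']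
--
--     # phase 1: one word-frequency table for the whole text
--     counts = {}
--     for word in in_between_text.split():
--         counts[word] = counts.get(word, 0) + 1
--
--     # phase 2: each category total is a sum of table lookups
--     values = [sum(counts.get(w, 0) for w in ks)
--               for ks in (int_list, advise_list, effect_list, mechanism_list)]
--     return [(feature_priority, v) for v in values]
-- ===== Notes on version B (the rewrite author's own statement) =====
-- stated objective: simpler
-- what changed: Instead of threading a four-key dict through the word loop with four membership tests per word, B builds one word-frequency table in a single tally pass and then computes each category total as a sum of table lookups over that category's keyword list.
import Mathlib
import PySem

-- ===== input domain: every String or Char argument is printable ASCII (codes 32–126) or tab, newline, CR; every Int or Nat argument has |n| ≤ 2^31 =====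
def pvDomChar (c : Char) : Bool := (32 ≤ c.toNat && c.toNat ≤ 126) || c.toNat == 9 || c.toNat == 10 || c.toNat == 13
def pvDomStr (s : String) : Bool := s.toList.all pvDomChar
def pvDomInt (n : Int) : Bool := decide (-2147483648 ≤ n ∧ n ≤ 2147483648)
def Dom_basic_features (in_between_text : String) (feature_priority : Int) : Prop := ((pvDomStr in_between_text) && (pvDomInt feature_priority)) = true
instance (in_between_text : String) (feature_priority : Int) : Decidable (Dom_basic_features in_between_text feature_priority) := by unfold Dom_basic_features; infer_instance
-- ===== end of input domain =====

-- B replaces A's four membership tests per word (threaded through a 4-key dict) by one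
-- word-frequency tally pass followed by per-category sums of table lookups: simpler two-phase shape.


-- ===== PORT A =====
-- the four keyword lists (same literals in both Pythons)
def pvAdviseList : List String := ["can", "could", "may", "might", "will", "shall", "should", "ought", "must", "would"]
def pvEffectList : List String := ["administer", "potentiate", "prevent", "effect", "cause"]
def pvMechanismList : List String := ["reduce", "increase", "decrease"]
def pvIntList : List String := ["interact", "interaction", "interfere"]

-- the body of A's for-loop (four sequential membership tests updating the dict)
def pvStepA (times : PySem.Dict String Int) (word : String) : PySem.Dict String Int :=
  let times := if pvIntList.contains word then times.insert "int" (times.getD "int" 0 + 1) else times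
  let times := if pvAdviseList.contains word then times.insert "advise" (times.getD "advise" 0 + 1) else times
  let times := if pvEffectList.contains word then times.insert "effect" (times.getD "effect" 0 + 1) else times
  let times := if pvMechanismList.contains word then times.insert "mechanism" (times.getD "mechanism" 0 + 1) else times
  times

def basic_features (in_between_text : String) (feature_priority : Int) : List (Int × Int) :=
  let times : PySem.Dict String Int :=
    PySem.Dict.ofList [("int", 0), ("advise", 0), ("effect", 0), ("mechanism", 0)]
  let times := (PySem.Str.split₀ in_between_text).foldl pvStepA times
  times.items.map (fun kv => (feature_priority, kv.2))

-- ===== PORT B =====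
def basic_features_alt (in_between_text : String) (feature_priority : Int) : List (Int × Int) :=
  -- phase 1: one word-frequency table for the whole text
  let counts := (PySem.Str.split₀ in_between_text).foldl
    (fun d w => d.insert w (d.getD w 0 + 1)) PySem.Dict.empty
  -- phase 2: each category total is a sum of table lookups
  let values := [pvIntList, pvAdviseList, pvEffectList, pvMechanismList].map
    (fun ks => (ks.map (fun w => counts.getD w 0)).sum)
  values.map (fun v => (feature_priority, v))

-- ===== PRECONDITION & SPEC =====
def Spec_basic_features (in_between_text : String) (feature_priority : Int) (out : List (Int × Int)) : Prop := out = basic_features_alt in_between_text feature_priority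
instance (in_between_text : String) (feature_priority : Int) (out : List (Int × Int)) : Decidable (Spec_basic_features in_between_text feature_priority out) := by unfold Spec_basic_features; infer_instance

-- ===== CLAIM (what is proved, stated in full; the proofs are below) =====
def Claim_equal_basic_features : Prop := ∀ (in_between_text : String) (feature_priority : Int), Dom_basic_features in_between_text feature_priority → Spec_basic_features in_between_text feature_priority (basic_features in_between_text feature_priority)

-- ===== LEMMAS AND PROOFS =====

-- one step of A's loop on the 4-key dict, component-wise
lemma pvStepA_eval (a b c d : Int) (w : String) :
    pvStepA (PySem.Dict.mk [("int", a), ("advise", b), ("effect", c), ("mechanism", d)]) w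
      = PySem.Dict.mk [("int", if pvIntList.contains w then a + 1 else a),
                       ("advise", if pvAdviseList.contains w then b + 1 else b),
                       ("effect", if pvEffectList.contains w then c + 1 else c),
                       ("mechanism", if pvMechanismList.contains w then d + 1 else d)] := by
  unfold pvStepA
  split_ifs <;>
    simp_all [PySem.Dict.insert, PySem.Dict.contains, PySem.Dict.getD, PySem.Dict.get?]

-- A's whole loop counts each category with countP
lemma pvA_fold (ws : List String) (a b c d : Int) :
    ws.foldl pvStepA (PySem.Dict.mk [("int", a), ("advise", b), ("effect", c), ("mechanism", d)])
      = PySem.Dict.mk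
          [("int", a + (ws.countP (fun w => pvIntList.contains w) : Int)),
           ("advise", b + (ws.countP (fun w => pvAdviseList.contains w) : Int)),
           ("effect", c + (ws.countP (fun w => pvEffectList.contains w) : Int)),
           ("mechanism", d + (ws.countP (fun w => pvMechanismList.contains w) : Int))] := by
  induction ws generalizing a b c d with
  | nil => simp
  | cons w ws ih =>
      rw [List.foldl_cons, pvStepA_eval, ih]
      congr 1
      simp only [List.countP_cons, List.cons.injEq, Prod.mk.injEq, and_true, true_and]
      refine ⟨?_, ?_, ?_, ?_⟩ <;> (split_ifs <;> push_cast <;> ring)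

-- a 0/1-sum over the keyword list counts the matches
lemma pvSum_ite (x : String) (ks : List String) :
    (ks.map (fun w => if x == w then (1 : Int) else 0)).sum
      = (ks.countP (fun w => x == w) : Int) := by
  induction ks with
  | nil => simp
  | cons k ks ihk =>
      simp only [List.map_cons, List.sum_cons, List.countP_cons, ihk]
      split_ifs <;> push_cast <;> ring

-- sum of table lookups over a duplicate-free keyword list = countP of membership
lemma pvSum_counts (ks : List String) (hnd : ks.Nodup) (ws : List String) :
    (ks.map (fun w => (ws.count w : Int))).sum = (ws.countP (fun w => ks.contains w) : Int) := by
  induction ws with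
  | nil => simp
  | cons x ws ih =>
      simp only [List.count_cons, List.countP_cons, Nat.cast_add, Nat.cast_ite,
        Nat.cast_one, Nat.cast_zero]
      rw [PySem.List.sum_map_add_int, ih, pvSum_ite]
      have hcnt : ks.countP (fun w => x == w) = ks.count x := by
        unfold List.count
        apply List.countP_congr
        intro a _
        by_cases h : x = a
        · simp [h]
        · simp [h, Ne.symm h]
      by_cases hx : x ∈ ks
      · have h1 : ks.count x = 1 := List.count_eq_one_of_mem hnd hx
        simp [hcnt, h1, hx]
      · have h0 : ks.count x = 0 := List.count_eq_zero_of_not_mem hx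
        simp [hcnt, h0, hx]

-- ===== VERDICT (by name: the statement is the Claim_ definition above) =====
theorem basic_features_spec : Claim_equal_basic_features := by
  intro t fp _
  simp only [Spec_basic_features, basic_features, basic_features_alt]
  have hof : (PySem.Dict.ofList [("int", (0:Int)), ("advise", 0), ("effect", 0), ("mechanism", 0)])
      = PySem.Dict.mk [("int", 0), ("advise", 0), ("effect", 0), ("mechanism", 0)] := by decide
  rw [hof, pvA_fold, PySem.Dict.foldl_insert_getD_add_one_eq_counter]
  simp only [List.map_cons, List.map_nil, PySem.Dict.getD_counter]
  rw [pvSum_counts pvIntList (by decide), pvSum_counts pvAdviseList (by decide),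
      pvSum_counts pvEffectList (by decide), pvSum_counts pvMechanismList (by decide)]
  simp
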